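-- pv_equiv track=rewrite | github.com/iabdul79/pyPlayground | slowQueenAttackSol.py | lrMove
-- ===== SOURCE A (Python) =====
-- def lrMove(n, qp, obs):
--   mv=0
--   i=qp[0]-1
--   j=qp[1]+1
--   while i>0 and j<=n:
--     if findOb(i,j, obs):
--       return mv
--     else:
--       mv+=1
--     i-=1
--     j+=1
--   return mv
--
-- def findOb(r,c,obs):
--   for o in obs:
--     if o[0] == r and o[1] == c:
--       return 1
--   return 0
-- ===== SOURCE B (Python) =====
-- def lrMove(n, qp, obs):
--     r, c = qp[0], qp[1]
--     K = min(r - 1, n - c)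
--     if K < 0:
--         K = 0
--     best = None
--     for o in obs:
--         k = r - o[0]
--         if o[1] - c == k and 1 <= k <= K and (best is None or k < best):
--             best = k
--     return K if best is None else best - 1
-- ===== Notes on version B (the rewrite author's own statement) =====
-- stated objective: alternative
-- what changed: Replaced the cell-by-cell diagonal walk (which rescans the whole obstacle list at every step) with a closed-form edge distance K = max(0, min(qp[0]-1, n-qp[1])) plus a single pass over the obstacle list keeping the minimum on-diagonal distance k; result is k-1 if any obstacle hit, else K.
-- outside the precondition, e.g. on lrMove(2, [1, 1], [[5]]): A returns 0, B raises IndexError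
import Mathlib
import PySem

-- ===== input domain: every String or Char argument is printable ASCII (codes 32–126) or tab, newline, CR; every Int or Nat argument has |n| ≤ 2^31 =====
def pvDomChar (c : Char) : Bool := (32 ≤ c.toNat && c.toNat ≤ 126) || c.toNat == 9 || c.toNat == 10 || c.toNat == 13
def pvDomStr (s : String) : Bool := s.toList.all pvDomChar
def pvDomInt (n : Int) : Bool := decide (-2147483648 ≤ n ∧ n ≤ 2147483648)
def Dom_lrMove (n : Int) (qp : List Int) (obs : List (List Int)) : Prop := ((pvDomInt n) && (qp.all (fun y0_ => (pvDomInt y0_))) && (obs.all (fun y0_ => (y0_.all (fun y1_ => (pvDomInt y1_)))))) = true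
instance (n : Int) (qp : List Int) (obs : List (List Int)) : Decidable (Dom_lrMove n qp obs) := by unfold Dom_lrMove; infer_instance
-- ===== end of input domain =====

-- B replaces A's cell-by-cell diagonal walk (rescanning all obstacles each step) by a
-- closed-form edge distance plus one pass over the obstacle list keeping the minimum hit distance.


-- ===== PORT A =====
-- o[0], o[1], qp[0], qp[1] are ported with pyGetD (default 0): exact on Pre_ (qp and all rows of length ≥ 2).
def findOb (r c : Int) (obs : List (List Int)) : Int :=
  match obs with
  | [] => 0
  | o :: rest =>
    if PySem.List.pyGetD o 0 0 = r ∧ PySem.List.pyGetD o 1 0 = c then 1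
    else findOb r c rest

def lrMoveLoop (n : Int) (obs : List (List Int)) (mv i j : Int) : Int :=
  if h : 0 < i ∧ j ≤ n then
    if findOb i j obs ≠ 0 then mv
    else lrMoveLoop n obs (mv + 1) (i - 1) (j + 1)
  else mv
termination_by i.toNat
decreasing_by omega

def lrMove (n : Int) (qp : List Int) (obs : List (List Int)) : Int :=
  lrMoveLoop n obs 0 (PySem.List.pyGetD qp 0 0 - 1) (PySem.List.pyGetD qp 1 0 + 1)

-- ===== PORT B =====
-- one step of Source B's for-loop: keep the smallest on-diagonal obstacle distance k with 1 ≤ k ≤ K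
def lrBStep (r c K : Int) (best : Option Int) (o : List Int) : Option Int :=
  let k := r - PySem.List.pyGetD o 0 0
  if PySem.List.pyGetD o 1 0 - c = k ∧ 1 ≤ k ∧ k ≤ K then
    match best with
    | none => some k
    | some b => if k < b then some k else best
  else best

def lrMove_alt (n : Int) (qp : List Int) (obs : List (List Int)) : Int :=
  let r := PySem.List.pyGetD qp 0 0
  let c := PySem.List.pyGetD qp 1 0
  let K0 := min (r - 1) (n - c)
  let K := if K0 < 0 then 0 else K0
  match obs.foldl (lrBStep r c K) none with
  | none => K
  | some b => b - 1

-- ===== PRECONDITION & SPEC =====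
-- Pre_ excludes inputs where qp or some obstacle row has fewer than 2 entries: there Python A's
-- qp[0]/qp[1]/o[0]/o[1] may raise IndexError (whether it does depends on how far the walk happens
-- to proceed, an accident of A's traversal), and B raises there too.
def Pre_lrMove (n : Int) (qp : List Int) (obs : List (List Int)) : Prop :=
  2 ≤ qp.length ∧ ∀ o ∈ obs, 2 ≤ o.length
instance (n : Int) (qp : List Int) (obs : List (List Int)) : Decidable (Pre_lrMove n qp obs) := by
  unfold Pre_lrMove; infer_instance

def pvWitness_lrMove : Int × List Int × List (List Int) := (8, [4, 4], [[2, 6], [1, 5]])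

def Spec_lrMove (n : Int) (qp : List Int) (obs : List (List Int)) (out : Int) : Prop := out = lrMove_alt n qp obs
instance (n : Int) (qp : List Int) (obs : List (List Int)) (out : Int) : Decidable (Spec_lrMove n qp obs out) := by unfold Spec_lrMove; infer_instance

-- ===== CLAIM (what is proved, stated in full; the proofs are below) =====
def Claim_equal_lrMove : Prop := ∀ (n : Int) (qp : List Int) (obs : List (List Int)), Dom_lrMove n qp obs → Pre_lrMove n qp obs → Spec_lrMove n qp obs (lrMove n qp obs)

-- ===== LEMMAS AND PROOFS =====

-- findOb is the indicator of an obstacle at (r, c)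
theorem findOb_ne_zero_iff (r c : Int) (obs : List (List Int)) :
    findOb r c obs ≠ 0 ↔ ∃ o ∈ obs, PySem.List.pyGetD o 0 0 = r ∧ PySem.List.pyGetD o 1 0 = c := by
  induction obs with
  | nil => simp [findOb]
  | cons o rest ih =>
    by_cases h : PySem.List.pyGetD o 0 0 = r ∧ PySem.List.pyGetD o 1 0 = c
    · simp [findOb, h]
    · simp [findOb, h, ih]

-- first-hit description of A's walk
theorem loop_eq (n : Int) (obs : List (List Int)) :
    ∀ (d : Nat) (i j mv : Int), i.toNat = d →
    lrMoveLoop n obs mv i j =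
      mv + (match (List.range (max 0 (min i (n - j + 1))).toNat).find?
              (fun s : Nat => findOb (i - (s:Int)) (j + (s:Int)) obs != 0) with
            | some s => (s : Int)
            | none => max 0 (min i (n - j + 1))) := by
  intro d
  induction d with
  | zero =>
    intro i j mv hd
    have hi : ¬ (0 < i) := by omega
    have hK : max 0 (min i (n - j + 1)) = 0 := by omega
    rw [lrMoveLoop]
    simp [hi, hK]
  | succ d ih =>
    intro i j mv hd
    have hi : 0 < i := by omega
    rw [lrMoveLoop]
    by_cases hj : j ≤ n
    · rw [dif_pos ⟨hi, hj⟩]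
      have hKn : (max 0 (min i (n - j + 1))).toNat = (max 0 (min i (n - j + 1)) - 1).toNat + 1 := by omega
      rw [hKn, List.range_succ_eq_map]
      by_cases hhit : findOb i j obs ≠ 0
      · rw [if_pos hhit]
        rw [List.find?_cons_of_pos (p := fun s : Nat => findOb (i - (s:Int)) (j + (s:Int)) obs != 0)
          (by simpa using hhit)]
        simp
      · rw [if_neg hhit]
        rw [ih (i - 1) (j + 1) (mv + 1) (by omega)]
        have hK' : max 0 (min (i - 1) (n - (j + 1) + 1)) = max 0 (min i (n - j + 1)) - 1 := by omega
        rw [List.find?_cons_of_neg (p := fun s : Nat => findOb (i - (s:Int)) (j + (s:Int)) obs != 0)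
          (by simpa using hhit), List.find?_map]
        have hcomp : ((fun s : Nat => findOb (i - (s:Int)) (j + (s:Int)) obs != 0) ∘ Nat.succ)
            = (fun s : Nat => findOb (i - 1 - (s:Int)) (j + 1 + (s:Int)) obs != 0) := by
          funext s
          simp only [Function.comp]
          congr 1; push_cast; ring_nf
        rw [hK', hcomp]
        cases hfind : (List.range (max 0 (min i (n - j + 1)) - 1).toNat).find?
            (fun s : Nat => findOb (i - 1 - (s:Int)) (j + 1 + (s:Int)) obs != 0) with
        | none => simp
        | some s => simp; ring
    · have hng : ¬ (0 < i ∧ j ≤ n) := by tauto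
      have hK : max 0 (min i (n - j + 1)) = 0 := by omega
      rw [dif_neg hng]
      simp [hK]

-- the candidate an obstacle row contributes in Source B's single pass
def lrCand (r c K : Int) (o : List Int) : Option Int :=
  if PySem.List.pyGetD o 1 0 - c = r - PySem.List.pyGetD o 0 0 ∧
      1 ≤ r - PySem.List.pyGetD o 0 0 ∧ r - PySem.List.pyGetD o 0 0 ≤ K
  then some (r - PySem.List.pyGetD o 0 0) else none

theorem fold_some (r c K : Int) :
    ∀ (obs : List (List Int)) (b : Int),
    obs.foldl (lrBStep r c K) (some b) = some ((obs.filterMap (lrCand r c K)).foldl min b) := by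
  intro obs
  induction obs with
  | nil => intro b; simp
  | cons o t ih =>
    intro b
    by_cases h : PySem.List.pyGetD o 1 0 - c = r - PySem.List.pyGetD o 0 0 ∧
        1 ≤ r - PySem.List.pyGetD o 0 0 ∧ r - PySem.List.pyGetD o 0 0 ≤ K
    · have hcand : lrCand r c K o = some (r - PySem.List.pyGetD o 0 0) := by
        simp only [lrCand, if_pos h]
      have hstep : lrBStep r c K (some b) o = some (min b (r - PySem.List.pyGetD o 0 0)) := by
        simp only [lrBStep, if_pos h]
        rcases le_or_gt b (r - PySem.List.pyGetD o 0 0) with hle | hlt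
        · rw [if_neg (by omega), min_eq_left hle]
        · rw [if_pos hlt, min_eq_right (by omega)]
      rw [List.foldl_cons, hstep, List.filterMap_cons, hcand, List.foldl_cons, ih]
    · have hcand : lrCand r c K o = none := by simp only [lrCand, if_neg h]
      have hstep : lrBStep r c K (some b) o = some b := by simp only [lrBStep, if_neg h]
      rw [List.foldl_cons, hstep, List.filterMap_cons, hcand, ih]

theorem fold_none (r c K : Int) (obs : List (List Int)) :
    obs.foldl (lrBStep r c K) none =
      match obs.filterMap (lrCand r c K) with
      | [] => none
      | a :: t => some (t.foldl min a) := by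
  induction obs with
  | nil => simp
  | cons o t ih =>
    by_cases h : PySem.List.pyGetD o 1 0 - c = r - PySem.List.pyGetD o 0 0 ∧
        1 ≤ r - PySem.List.pyGetD o 0 0 ∧ r - PySem.List.pyGetD o 0 0 ≤ K
    · have hcand : lrCand r c K o = some (r - PySem.List.pyGetD o 0 0) := by
        simp only [lrCand, if_pos h]
      have hstep : lrBStep r c K none o = some (r - PySem.List.pyGetD o 0 0) := by
        simp only [lrBStep, if_pos h]
      rw [List.foldl_cons, hstep, List.filterMap_cons, hcand, fold_some]
    · have hcand : lrCand r c K o = none := by simp only [lrCand, if_neg h]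
      have hstep : lrBStep r c K none o = none := by simp only [lrBStep, if_neg h]
      rw [List.foldl_cons, hstep, List.filterMap_cons, hcand, ih]

-- membership in the candidate list = an obstacle at diagonal distance k within range
theorem mem_cs_iff (r c K k : Int) (obs : List (List Int)) :
    k ∈ obs.filterMap (lrCand r c K) ↔
      (1 ≤ k ∧ k ≤ K ∧ findOb (r - k) (c + k) obs ≠ 0) := by
  rw [List.mem_filterMap]
  constructor
  · rintro ⟨o, ho, hc⟩
    unfold lrCand at hc
    split_ifs at hc with h
    · injection hc with hk
      refine ⟨by omega, by omega, ?_⟩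
      rw [findOb_ne_zero_iff]
      exact ⟨o, ho, by omega, by omega⟩
  · rintro ⟨h1, h2, h3⟩
    rw [findOb_ne_zero_iff] at h3
    obtain ⟨o, ho, e0, e1⟩ := h3
    refine ⟨o, ho, ?_⟩
    unfold lrCand
    rw [if_pos ⟨by omega, by omega, by omega⟩]
    congr 1
    omega

-- first-match minimality on a range: everything before the found index fails the predicate
theorem find?_range_lt {p : Nat → Bool} {n s : Nat}
    (h : (List.range n).find? p = some s) : ∀ t, t < s → ¬ p t = true := by
  rw [List.find?_eq_some_iff_append] at h
  obtain ⟨hp, as, bs, heq, hall⟩ := h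
  have hlen : as.length < n := by
    have := congrArg List.length heq; simp at this; omega
  have h2 : (List.range n)[as.length]? = some as.length := by simp [hlen]
  rw [heq] at h2
  have h1 : (as ++ s :: bs)[as.length]? = some s := by simp
  have hs : s = as.length := by rw [h1] at h2; injection h2
  have hasr : as = List.range as.length := by
    have h3 : (List.range n).take as.length = as := by rw [heq]; exact List.take_left ..
    rw [List.take_range, min_eq_left (by omega)] at h3
    exact h3.symm
  intro t ht
  have : t ∈ as := by rw [hasr]; exact List.mem_range.mpr (by omega)
  simpa using hall t this

-- ===== VERDICT (by name: the statement is the Claim_ definition above) =====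
theorem lrMove_spec : Claim_equal_lrMove := by
  unfold Claim_equal_lrMove
  intro n qp obs _ _
  unfold Spec_lrMove
  set P := PySem.List.pyGetD qp 0 0 with hP
  set Q := PySem.List.pyGetD qp 1 0 with hQ
  rw [lrMove, loop_eq n obs (P - 1).toNat (P - 1) (Q + 1) 0 rfl]
  have harg : n - (Q + 1) + 1 = n - Q := by ring
  rw [harg]
  set K := max 0 (min (P - 1) (n - Q)) with hK
  have halt : lrMove_alt n qp obs =
      match obs.filterMap (lrCand P Q K) with
      | [] => K
      | a :: t => t.foldl min a - 1 := by
    simp only [lrMove_alt, ← hP, ← hQ]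
    have hKif : (if min (P - 1) (n - Q) < 0 then (0:Int) else min (P - 1) (n - Q)) = K := by omega
    rw [hKif, fold_none]
    cases obs.filterMap (lrCand P Q K) <;> simp
  rw [halt]
  cases hfind : (List.range K.toNat).find?
      (fun s : Nat => findOb (P - 1 - (s:Int)) (Q + 1 + (s:Int)) obs != 0) with
  | none =>
    cases hcs : obs.filterMap (lrCand P Q K) with
    | nil => simp
    | cons a t =>
      exfalso
      have hm : t.foldl min a ∈ obs.filterMap (lrCand P Q K) := by
        rw [hcs]
        rcases (PySem.List.foldl_min_mem t a) with h | h
        · rw [h]; exact List.mem_cons_self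
        · exact List.mem_cons_of_mem a h
      rw [mem_cs_iff] at hm
      obtain ⟨h1, h2, h3⟩ := hm
      set m := t.foldl min a with hm'
      have hmem : (m - 1).toNat ∈ List.range K.toNat := List.mem_range.mpr (by omega)
      have hno := List.find?_eq_none.mp hfind _ hmem
      apply hno
      have e1 : P - 1 - (((m - 1).toNat : Nat) : Int) = P - m := by omega
      have e2 : Q + 1 + (((m - 1).toNat : Nat) : Int) = Q + m := by omega
      simp only [e1, e2, bne_iff_ne, ne_eq]
      exact h3
  | some s =>
    have hsp := List.find?_some hfind
    have hslt : s < K.toNat := List.mem_range.mp (List.mem_of_find?_eq_some hfind)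
    have hpred : findOb (P - ((s:Int) + 1)) (Q + ((s:Int) + 1)) obs ≠ 0 := by
      have e1 : P - ((s:Int) + 1) = P - 1 - (s:Int) := by ring
      have e2 : Q + ((s:Int) + 1) = Q + 1 + (s:Int) := by ring
      rw [e1, e2]
      simpa [bne_iff_ne] using hsp
    have hk : ((s:Int) + 1) ∈ obs.filterMap (lrCand P Q K) := by
      rw [mem_cs_iff]
      exact ⟨by omega, by omega, hpred⟩
    cases hcs : obs.filterMap (lrCand P Q K) with
    | nil => exfalso; rw [hcs] at hk; simp at hk
    | cons a t =>
      rw [hcs] at hk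
      set m := t.foldl min a with hm'
      have hmle : m ≤ (s:Int) + 1 := by
        rcases List.mem_cons.mp hk with h | h
        · rw [h]; exact (PySem.List.foldl_min_le t a).1
        · exact (PySem.List.foldl_min_le t a).2 _ h
      have hmmem : m ∈ obs.filterMap (lrCand P Q K) := by
        rw [hcs, hm']
        rcases (PySem.List.foldl_min_mem t a) with h | h
        · rw [h]; exact List.mem_cons_self
        · exact List.mem_cons_of_mem a h
      rw [mem_cs_iff] at hmmem
      obtain ⟨h1, h2, h3⟩ := hmmem
      have hsle : (s:Int) + 1 ≤ m := by
        by_contra hlt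
        have htlt : (m - 1).toNat < s := by omega
        have := find?_range_lt hfind _ htlt
        apply this
        have e1 : P - 1 - (((m - 1).toNat : Nat) : Int) = P - m := by omega
        have e2 : Q + 1 + (((m - 1).toNat : Nat) : Int) = Q + m := by omega
        simp only [e1, e2, bne_iff_ne, ne_eq]
        exact h3
      show (0:Int) + (s:Int) = m - 1
      omega
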